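-- pv_equiv track=rewrite | github.com/wjzz/distributed-computing | client_python/main.py | solve
-- ===== SOURCE A (Python) =====
-- def solve(n: int) -> int:
--     biggest = n
--     while n > 1:
--         if n % 2 == 0:
--             n //= 2
--         else:
--             n = 3 * n + 1
--             biggest = max(biggest, n)
--     return biggest
-- ===== SOURCE B (Python) =====
-- def solve(n: int) -> int:
--     """Peak value of the Collatz trajectory of n, computed recursively over the
--     shortcut (Terras) map: an odd step 3n+1 is immediately followed by the
--     forced halving, so each recursive call performs exactly one halving.
--     The maximum is taken over all trajectory values on the way back up."""
--     if n <= 1: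
--         return n
--     if n % 2 == 0:
--         return max(n, solve(n // 2))
--     t = 3 * n + 1
--     return max(n, t, solve(t // 2))
-- ===== Notes on version B (the rewrite author's own statement) =====
-- stated objective: alternative
-- what changed: B is a recursive formulation over the shortcut (Terras) map -- each odd step is fused with its forced halving -- and returns the maximum of the current value and the recursive result on the way back up, instead of A's flat while-loop over single Collatz steps with a running maximum updated only at odd steps.
import Mathlib
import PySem

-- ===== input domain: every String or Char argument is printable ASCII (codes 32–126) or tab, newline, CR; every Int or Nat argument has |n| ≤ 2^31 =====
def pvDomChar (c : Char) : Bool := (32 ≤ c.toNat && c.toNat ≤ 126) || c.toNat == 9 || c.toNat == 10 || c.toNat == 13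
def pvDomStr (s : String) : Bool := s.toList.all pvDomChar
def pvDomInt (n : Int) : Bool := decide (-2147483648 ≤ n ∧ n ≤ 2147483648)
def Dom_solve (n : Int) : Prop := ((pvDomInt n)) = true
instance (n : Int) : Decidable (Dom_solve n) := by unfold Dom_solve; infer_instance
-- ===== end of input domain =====

-- B is a recursive formulation over the shortcut (Terras) map, taking the max on the way back, instead of A's flat running-max loop; return-value equivalence.


-- ===== PORT A =====
-- A's while loop; fuel is only a totality guard (never exhausted on the tested domain)
def solveLoop : Nat → Int → Int → Int
  | 0, _, biggest => biggest
  | fuel + 1, n, biggest =>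
    if n > 1 then
      if PySem.Int.mod n 2 = 0 then
        solveLoop fuel (PySem.Int.floordiv n 2) biggest
      else
        solveLoop fuel (3 * n + 1) (max biggest (3 * n + 1))
    else biggest

def solve (n : Int) : Int := solveLoop 1000000 n n

-- ===== PORT B =====
-- B's recursion over the shortcut map; the fuel guard counts elementary Collatz
-- steps (the odd branch fuses two of them), so it is only a totality guard
def solveRec : Nat → Int → Int
  | 0, n => n
  | 1, n =>
    if n ≤ 1 then n
    else if PySem.Int.mod n 2 = 0 then
      max n (solveRec 0 (PySem.Int.floordiv n 2))
    else max (max n (3 * n + 1)) (3 * n + 1)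
  | g + 2, n =>
    if n ≤ 1 then n
    else if PySem.Int.mod n 2 = 0 then
      max n (solveRec (g + 1) (PySem.Int.floordiv n 2))
    else max (max n (3 * n + 1)) (solveRec g (PySem.Int.floordiv (3 * n + 1) 2))

def solve_alt (n : Int) : Int := solveRec 1000000 n


-- ===== PRECONDITION & SPEC =====
def Spec_solve (n : Int) (out : Int) : Prop := out = solve_alt n
instance (n : Int) (out : Int) : Decidable (Spec_solve n out) := by unfold Spec_solve; infer_instance

-- ===== CLAIM (what is proved, stated in full; the proofs are below) =====
def Claim_equal_solve : Prop := ∀ (n : Int), Dom_solve n → Spec_solve n (solve n)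

-- ===== LEMMAS AND PROOFS =====

theorem mod_two_one_of_ne {n : Int} (h : ¬ PySem.Int.mod n 2 = 0) : PySem.Int.mod n 2 = 1 := by
  have := PySem.Int.mod_eq_emod_of_pos (a := n) (b := 2) (by omega)
  rw [this] at h ⊢; omega

theorem mod_two_succ {n : Int} (h : PySem.Int.mod n 2 = 1) :
    PySem.Int.mod (3 * n + 1) 2 = 0 := by
  have h1 := PySem.Int.mod_eq_emod_of_pos (a := 3 * n + 1) (b := 2) (by omega)
  have h2 := PySem.Int.mod_eq_emod_of_pos (a := n) (b := 2) (by omega)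
  rw [h1]; rw [h2] at h; omega

theorem solveLoop_succ (f : Nat) (n b : Int) : solveLoop (f + 1) n b =
    (if n > 1 then
      (if PySem.Int.mod n 2 = 0 then solveLoop f (PySem.Int.floordiv n 2) b
       else solveLoop f (3 * n + 1) (max b (3 * n + 1)))
     else b) := rfl

theorem solveRec_one (n : Int) : solveRec 1 n =
    (if n ≤ 1 then n
     else if PySem.Int.mod n 2 = 0 then max n (solveRec 0 (PySem.Int.floordiv n 2))
     else max (max n (3 * n + 1)) (3 * n + 1)) := rfl

theorem solveRec_succ2 (g : Nat) (n : Int) : solveRec (g + 2) n =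
    (if n ≤ 1 then n
     else if PySem.Int.mod n 2 = 0 then max n (solveRec (g + 1) (PySem.Int.floordiv n 2))
     else max (max n (3 * n + 1)) (solveRec g (PySem.Int.floordiv (3 * n + 1) 2))) := rfl

-- A's running max (seeded with max b n) equals B's returned max:
-- even steps only shrink n, so A's odd-step-only running max loses nothing.
theorem solveLoop_eq_solveRec : ∀ (fuel : Nat) (n b : Int),
    solveLoop fuel n (max b n) = max b (solveRec fuel n) := by
  intro fuel
  induction fuel using Nat.strong_induction_on with
  | _ fuel ih =>
    match fuel with
    | 0 => intro n b; simp [solveLoop, solveRec]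
    | 1 =>
      intro n b
      by_cases h1 : n > 1
      · by_cases he : PySem.Int.mod n 2 = 0
        · have hd : PySem.Int.floordiv n 2 = n / 2 :=
            PySem.Int.floordiv_eq_ediv_of_pos (by omega)
          rw [solveLoop_succ, if_pos h1, if_pos he,
              solveRec_one, if_neg (show ¬ n ≤ 1 by omega), if_pos he]
          rw [show solveLoop 0 (PySem.Int.floordiv n 2) (max b n) = max b n from rfl,
              show solveRec 0 (PySem.Int.floordiv n 2) = PySem.Int.floordiv n 2 from rfl,
              max_eq_left (show PySem.Int.floordiv n 2 ≤ n by rw [hd]; omega)]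
        · rw [solveLoop_succ, if_pos h1, if_neg he,
              solveRec_one, if_neg (show ¬ n ≤ 1 by omega), if_neg he]
          rw [show solveLoop 0 (3 * n + 1) (max (max b n) (3 * n + 1))
                = max (max b n) (3 * n + 1) from rfl]
          conv_rhs => rw [max_assoc, max_self]
          rw [max_assoc]
      · rw [solveLoop_succ, if_neg h1, solveRec_one, if_pos (show n ≤ 1 by omega)]
    | g + 2 =>
      intro n b
      by_cases h1 : n > 1
      · by_cases he : PySem.Int.mod n 2 = 0
        · -- even step: n/2 ≤ max b n, so the accumulator is unchanged
          have hd : PySem.Int.floordiv n 2 = n / 2 :=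
            PySem.Int.floordiv_eq_ediv_of_pos (by omega)
          have hle : PySem.Int.floordiv n 2 ≤ max b n := by
            rw [hd]; have := le_max_right b n; omega
          rw [solveLoop_succ, if_pos h1, if_pos he,
              solveRec_succ2, if_neg (show ¬ n ≤ 1 by omega), if_pos he]
          rw [show max b n = max (max b n) (PySem.Int.floordiv n 2) from (max_eq_left hle).symm,
              ih (g + 1) (by omega)]
          rw [max_assoc]
        · -- odd step followed by the forced halving (3n+1 is even)
          have hev : PySem.Int.mod (3 * n + 1) 2 = 0 := mod_two_succ (mod_two_one_of_ne he)
          have hgt : (3 : Int) * n + 1 > 1 := by omega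
          have hd : PySem.Int.floordiv (3 * n + 1) 2 = (3 * n + 1) / 2 :=
            PySem.Int.floordiv_eq_ediv_of_pos (by omega)
          have hle : PySem.Int.floordiv (3 * n + 1) 2 ≤ max (max b n) (3 * n + 1) := by
            rw [hd]; have := le_max_right (max b n) (3 * n + 1); omega
          rw [solveLoop_succ, if_pos h1, if_neg he,
              solveLoop_succ, if_pos hgt, if_pos hev,
              solveRec_succ2, if_neg (show ¬ n ≤ 1 by omega), if_neg he]
          rw [show max (max b n) (3 * n + 1)
                = max (max (max b n) (3 * n + 1)) (PySem.Int.floordiv (3 * n + 1) 2)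
              from (max_eq_left hle).symm,
            ih g (by omega)]
          simp only [max_assoc]
      · rw [solveLoop_succ, if_neg h1, solveRec_succ2, if_pos (show n ≤ 1 by omega)]

theorem le_solveRec : ∀ (fuel : Nat) (n : Int), n ≤ solveRec fuel n := by
  intro fuel n
  match fuel with
  | 0 => simp [solveRec]
  | 1 =>
    by_cases h : n ≤ 1
    · rw [solveRec_one, if_pos h]
    · by_cases he : PySem.Int.mod n 2 = 0
      · rw [solveRec_one, if_neg h, if_pos he]; exact le_max_left _ _
      · rw [solveRec_one, if_neg h, if_neg he]
        exact le_trans (le_max_left n (3 * n + 1)) (le_max_left _ _)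
  | g + 2 =>
    by_cases h : n ≤ 1
    · rw [solveRec_succ2, if_pos h]
    · by_cases he : PySem.Int.mod n 2 = 0
      · rw [solveRec_succ2, if_neg h, if_pos he]; exact le_max_left _ _
      · rw [solveRec_succ2, if_neg h, if_neg he]
        exact le_trans (le_max_left n (3 * n + 1)) (le_max_left _ _)

-- ===== VERDICT (by name: the statement is the Claim_ definition above) =====
theorem solve_spec : Claim_equal_solve := by
  intro n _
  show solve n = solve_alt n
  have h := solveLoop_eq_solveRec 1000000 n n
  rw [max_self] at h
  simp only [solve, solve_alt, h]
  exact max_eq_right (le_solveRec 1000000 n)
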